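-- pv_equiv track=rewrite | github.com/0-5788719150923125/vtx | src/head.py | truncate_long_sequences
-- ===== SOURCE A (Python) =====
-- def truncate_long_sequences(text, max_length=20):
--     result = ""
--     current_sequence = ""
--
--     for char in text:
--         if char.isspace():
--             result += current_sequence + char
--             current_sequence = ""
--         else:
--             current_sequence += char
--
--             if len(current_sequence) > max_length:
--                 return result.rstrip()
--
--     return result + current_sequence
-- ===== SOURCE B (Python) =====
-- from itertools import groupby
--
-- def truncate_long_sequences(text, max_length=20):
--     result = ""
--     for is_space, group in groupby(text, key=str.isspace):
--         segment = "".join(group)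
--         if not is_space and len(segment) > max_length:
--             return result.rstrip()
--         result += segment
--     return result
-- ===== Notes on version B (the rewrite author's own statement) =====
-- stated objective: idiomatic
-- what changed: B splits the text into maximal whitespace/non-whitespace runs (itertools.groupby on str.isspace) and processes whole segments, instead of A's character-by-character loop maintaining a current_sequence accumulator.
import Mathlib
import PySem

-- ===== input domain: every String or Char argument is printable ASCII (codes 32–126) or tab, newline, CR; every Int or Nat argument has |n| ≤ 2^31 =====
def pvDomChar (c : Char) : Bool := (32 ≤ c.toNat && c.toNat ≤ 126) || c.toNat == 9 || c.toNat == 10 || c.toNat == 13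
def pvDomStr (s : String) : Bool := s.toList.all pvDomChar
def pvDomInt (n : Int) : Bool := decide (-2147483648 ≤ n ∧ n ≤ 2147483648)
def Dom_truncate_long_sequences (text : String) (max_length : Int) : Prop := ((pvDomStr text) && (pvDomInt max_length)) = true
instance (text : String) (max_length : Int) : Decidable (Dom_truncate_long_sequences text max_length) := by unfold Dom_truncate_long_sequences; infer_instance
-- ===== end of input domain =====

-- B replaces A's character-by-character accumulator with a groupby-style split of the text
-- into maximal whitespace/non-whitespace runs processed whole (objective: idiomatic).

-- ===== PORT A =====
-- A's for-loop over characters with (result, current_sequence) state.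
def pvAgo (max_length : Int) : List Char → List Char → List Char → List Char
  | [], result, current_sequence => result ++ current_sequence
  | c :: rest, result, current_sequence =>
    if PySem.Chars.isspace c = true then
      pvAgo max_length rest (result ++ current_sequence ++ [c]) []
    else
      let cur := current_sequence ++ [c]
      if (cur.length : Int) > max_length then PySem.Chars.rstrip result
      else pvAgo max_length rest result cur

def truncate_long_sequences (text : String) (max_length : Int) : String :=
  String.ofList (pvAgo max_length text.toList [] [])

-- ===== PORT B =====
-- itertools.groupby(text, key=str.isspace): maximal runs of equal isspace-class.
def pvGroups : List Char → List (List Char)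
  | [] => []
  | c :: cs =>
    (c :: cs.takeWhile (fun d => PySem.Chars.isspace d == PySem.Chars.isspace c)) ::
      pvGroups (cs.dropWhile (fun d => PySem.Chars.isspace d == PySem.Chars.isspace c))
termination_by l => l.length
decreasing_by
  simp
  exact List.length_dropWhile_le _ _

-- B's loop over groups: bail out (rstrip) on an oversized word group, else append the segment.
def pvBgo (max_length : Int) : List (List Char) → List Char → List Char
  | [], result => result
  | g :: gs, result =>
    if !PySem.Chars.isspace g.headI && decide ((g.length : Int) > max_length) then
      PySem.Chars.rstrip result
    else
      pvBgo max_length gs (result ++ g)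

def truncate_long_sequences_alt (text : String) (max_length : Int) : String :=
  String.ofList (pvBgo max_length (pvGroups text.toList) [])

-- ===== PRECONDITION & SPEC =====
def Spec_truncate_long_sequences (text : String) (max_length : Int) (out : String) : Prop := out = truncate_long_sequences_alt text max_length
instance (text : String) (max_length : Int) (out : String) : Decidable (Spec_truncate_long_sequences text max_length out) := by unfold Spec_truncate_long_sequences; infer_instance

-- ===== CLAIM (what is proved, stated in full; the proofs are below) =====
def Claim_equal_truncate_long_sequences : Prop := ∀ (text : String) (max_length : Int), Dom_truncate_long_sequences text max_length → Spec_truncate_long_sequences text max_length (truncate_long_sequences text max_length)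

-- ===== LEMMAS AND PROOFS =====

theorem pvGroups_nil : pvGroups [] = [] := by rw [pvGroups.eq_def]

theorem pvGroups_cons (c : Char) (cs : List Char) : pvGroups (c :: cs) =
    (c :: cs.takeWhile (fun d => PySem.Chars.isspace d == PySem.Chars.isspace c)) ::
      pvGroups (cs.dropWhile (fun d => PySem.Chars.isspace d == PySem.Chars.isspace c)) := by
  rw [pvGroups.eq_def]

-- the head of a dropWhile either does not exist or fails the predicate
theorem pv_dropWhile_head (p : Char → Bool) (l : List Char) :
    List.dropWhile p l = [] ∨ ∃ c t, List.dropWhile p l = c :: t ∧ p c = false := by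
  induction l with
  | nil => left; rfl
  | cons c t ih =>
    by_cases h : p c = true
    · simpa [List.dropWhile_cons, h] using ih
    · right
      exact ⟨c, t, by simp [h], by simpa using h⟩

-- A's loop flushes a whitespace run (from an empty current_sequence) straight into result
theorem pv_ws (m : Int) (ws : List Char) (h : ∀ c ∈ ws, PySem.Chars.isspace c = true) :
    ∀ rest res : List Char, pvAgo m (ws ++ rest) res [] = pvAgo m rest (res ++ ws) [] := by
  induction ws with
  | nil => intro rest res; simp
  | cons c t ih =>
    intro rest res
    have hc : PySem.Chars.isspace c = true := h c (by simp)
    simp only [List.cons_append, pvAgo, hc, if_pos]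
    rw [ih (fun d hd => h d (by simp [hd]))]
    simp

-- A's loop over a non-whitespace run: returns rstrip result iff the run pushes
-- current_sequence past max_length, else accumulates the whole run
theorem pv_word (m : Int) (w : List Char) (h : ∀ c ∈ w, PySem.Chars.isspace c = false) :
    ∀ rest res cur : List Char, (w = [] → (cur.length : Int) ≤ m) →
    pvAgo m (w ++ rest) res cur =
      if ((cur.length : Int) + w.length > m) then PySem.Chars.rstrip res
      else pvAgo m rest res (cur ++ w) := by
  induction w with
  | nil =>
    intro rest res cur hcur
    have hle := hcur rfl
    rw [List.nil_append, List.append_nil, if_neg (by simp; omega)]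
  | cons c t ih =>
    intro rest res cur hcur
    have hc : PySem.Chars.isspace c = false := h c (by simp)
    have hstep : pvAgo m ((c :: t) ++ rest) res cur =
        (if ((cur ++ [c]).length : Int) > m then PySem.Chars.rstrip res
         else pvAgo m (t ++ rest) res (cur ++ [c])) := by
      simp only [List.cons_append, pvAgo, hc]
      simp
    by_cases hlen : ((cur.length : Int) + 1 > m)
    · rw [hstep, if_pos (by simp; omega), if_pos (by simp; omega)]
    · rw [hstep, if_neg (by simp; omega)]
      rw [ih (fun d hd => h d (by simp [hd])) rest res (cur ++ [c])
          (fun _ => by simp; omega)]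
      simp only [List.append_assoc, List.singleton_append]
      split_ifs with h1 h2 h2 <;> first
        | rfl
        | (exfalso; simp at h1 h2 ⊢; omega)

-- main invariant: A's loop from state (res, w) — with w empty, or the rest of the
-- text empty or starting with whitespace — equals B's loop over the remaining groups
theorem pv_main (m : Int) : ∀ n (l : List Char), l.length ≤ n → ∀ res w : List Char,
    (w = [] ∨ l = [] ∨ PySem.Chars.isspace l.headI = true) →
    pvAgo m l res w = pvBgo m (pvGroups l) (res ++ w) := by
  intro n
  induction n with
  | zero =>
    intro l hl res w _
    have hnil : l = [] := by cases l with | nil => rfl | cons a b => simp at hl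
    subst hnil
    simp [pvAgo, pvGroups_nil, pvBgo]
  | succ n ih =>
    intro l hl res w hw
    cases l with
    | nil => simp [pvAgo, pvGroups_nil, pvBgo]
    | cons c cs =>
      have hgroups := pvGroups_cons c cs
      set p := (fun d => PySem.Chars.isspace d == PySem.Chars.isspace c) with hp
      have hsplit : cs.takeWhile p ++ cs.dropWhile p = cs := List.takeWhile_append_dropWhile
      have hdroplen : (cs.dropWhile p).length ≤ n := by
        have := List.length_dropWhile_le p cs
        simp at hl; omega
      by_cases hc : PySem.Chars.isspace c = true
      · -- whitespace run
        have htake : ∀ d ∈ cs.takeWhile p, PySem.Chars.isspace d = true := by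
          intro d hd
          have hpd := List.mem_takeWhile_imp hd
          rw [hp] at hpd; simp [hc] at hpd; exact hpd
        have hA : pvAgo m (c :: cs) res w =
            pvAgo m (cs.dropWhile p) (res ++ w ++ [c] ++ cs.takeWhile p) [] := by
          simp only [pvAgo, hc, if_pos]
          conv_lhs => rw [← hsplit]
          rw [pv_ws m _ htake]
        have hB : pvBgo m (pvGroups (c :: cs)) (res ++ w) =
            pvBgo m (pvGroups (cs.dropWhile p)) ((res ++ w) ++ (c :: cs.takeWhile p)) := by
          rw [hgroups]
          simp [pvBgo, hc]
        rw [hA, hB, ih _ hdroplen _ [] (Or.inl rfl)]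
        simp
      · -- word run
        have hw0 : w = [] := by
          rcases hw with h | h | h
          · exact h
          · simp at h
          · simp [List.headI] at h; exact absurd h hc
        subst hw0
        have hc' : PySem.Chars.isspace c = false := by simpa using hc
        have htake : ∀ d ∈ (c :: cs.takeWhile p), PySem.Chars.isspace d = false := by
          intro d hd
          rcases List.mem_cons.mp hd with h | h
          · subst h; exact hc'
          · have hpd := List.mem_takeWhile_imp h
            rw [hp] at hpd; simp at hpd
            rw [hpd, hc']
        have hword := pv_word m (c :: cs.takeWhile p) htake (cs.dropWhile p) res []
          (fun h => by simp at h)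
        have hA : pvAgo m (c :: cs) res [] =
            if (((c :: cs.takeWhile p).length : Int) > m) then PySem.Chars.rstrip res
            else pvAgo m (cs.dropWhile p) res (c :: cs.takeWhile p) := by
          conv_lhs => rw [← hsplit]
          rw [show (c :: (cs.takeWhile p ++ cs.dropWhile p)) =
                (c :: cs.takeWhile p) ++ cs.dropWhile p by simp]
          rw [hword]
          simp
        rw [hA, hgroups]
        by_cases hlen : (((c :: cs.takeWhile p).length : Int) > m)
        · rw [if_pos hlen]
          have hcond : (!PySem.Chars.isspace (c :: cs.takeWhile p).headI &&
              decide (((c :: cs.takeWhile p).length : Int) > m)) = true := by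
            simp only [List.length_cons, Nat.cast_add, Nat.cast_one] at hlen
            simp [List.headI, hc']
            omega
          simp only [pvBgo, hcond, if_pos]
          simp
        · rw [if_neg hlen]
          have hcond : (!PySem.Chars.isspace (c :: cs.takeWhile p).headI &&
              decide (((c :: cs.takeWhile p).length : Int) > m)) = false := by
            simp only [List.length_cons, Nat.cast_add, Nat.cast_one] at hlen
            simp [List.headI, hc']
            omega
          have hB : pvBgo m ((c :: cs.takeWhile p) :: pvGroups (cs.dropWhile p)) (res ++ []) =
              pvBgo m (pvGroups (cs.dropWhile p)) ((res ++ []) ++ (c :: cs.takeWhile p)) := by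
            simp only [pvBgo, hcond, Bool.false_eq_true, if_false]
          rw [hB]
          have hrest : cs.dropWhile p = [] ∨ PySem.Chars.isspace (cs.dropWhile p).headI = true := by
            rcases pv_dropWhile_head p cs with h | ⟨d, t, heq, hd⟩
            · left; exact h
            · right
              rw [hp] at hd
              have hd' : PySem.Chars.isspace d = true := by
                simp [hc'] at hd; exact hd
              rw [heq]; simpa [List.headI] using hd'
          rw [ih _ hdroplen res (c :: cs.takeWhile p) (Or.inr hrest)]
          simp

-- ===== VERDICT (by name: the statement is the Claim_ definition above) =====
theorem truncate_long_sequences_spec : Claim_equal_truncate_long_sequences := by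
  intro text m _
  unfold Spec_truncate_long_sequences truncate_long_sequences truncate_long_sequences_alt
  have h := pv_main m text.toList.length text.toList le_rfl [] [] (Or.inl rfl)
  simp at h
  rw [h]
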